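-- pv_equiv track=rewrite | github.com/540792740/2019_Python | Project/Leetcode/Amazon/322. Coin Change.py | coinChange1
-- ===== SOURCE A (Python) =====
-- def coinChange1(coins, amount):
--     coins.sort()
--     res = 2 ** 31 - 1
--     coin_list = []
--     def dfs(coins, path):
--         if path not in coin_list and path: coin_list.append(path)
--         for i in range(len(coins)):
--             dfs(coins[i + 1:], path + [coins[i]])
--     dfs(coins, [])
--     for coin in coin_list:
--         count = 0
--         temp = amount
--         for i in range(len(coin) - 1, -1, -1):
--             count += temp // coin[i]
--             temp %= coin[i]
--         if temp > 0 or count == 0: count = 2 ** 31 - 1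
--         res = min(count, res)
--     if res == 2 ** 31 - 1: return -1
--     return res
-- ===== SOURCE B (Python) =====
-- def coinChange1(coins, amount):
--     # Same return value as A; like A, sorts `coins` in place (caller-visible mutation).
--     coins.sort()
--     INF = 2 ** 31 - 1
--
--     def rec(cs, t, c):
--         # cs: remaining coins, largest first; at each coin choose skip or greedy-take.
--         if not cs:
--             return c if (t <= 0 and c != 0) else INF
--         head, rest = cs[0], cs[1:]
--         return min(rec(rest, t, c), rec(rest, t % head, c + t // head))
--
--     res = rec(coins[::-1], amount, 0)
--     return -1 if res == INF else res
-- ===== Notes on version B (the rewrite author's own statement) =====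
-- stated objective: alternative
-- what changed: A materializes a deduplicated list of every nonempty coin subset (each membership test scans the growing list) and then greedily evaluates each subset; B never builds that list, doing one skip/take recursion over the sorted coins largest-first that folds the greedy count into a running minimum (intended as faster; a timing run saw A time out at n=16 where B returned, but could not measure a ratio).
import Mathlib
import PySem

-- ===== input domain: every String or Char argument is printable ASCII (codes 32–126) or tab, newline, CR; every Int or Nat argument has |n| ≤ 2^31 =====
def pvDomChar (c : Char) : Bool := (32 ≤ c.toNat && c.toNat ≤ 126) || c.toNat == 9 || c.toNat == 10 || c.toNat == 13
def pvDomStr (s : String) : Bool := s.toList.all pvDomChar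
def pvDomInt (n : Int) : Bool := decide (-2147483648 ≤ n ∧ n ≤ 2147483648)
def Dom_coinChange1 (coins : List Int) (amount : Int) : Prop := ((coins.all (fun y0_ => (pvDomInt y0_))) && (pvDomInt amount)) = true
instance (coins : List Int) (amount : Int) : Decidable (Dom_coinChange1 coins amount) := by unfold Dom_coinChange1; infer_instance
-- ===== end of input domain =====

-- B replaces A's materialized deduplicated list of all coin subsets (each then evaluated
-- greedily) by a single skip/take min-recursion over the sorted coins, largest first.
-- Both A and this port's Python B sort `coins` in place (caller-visible mutation);
-- the equivalence proved here is about the return value.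

-- ===== PORT A =====
-- `if path not in coin_list and path: coin_list.append(path)`
def pushA (path : List Int) (acc : List (List Int)) : List (List Int) :=
  if path ∉ acc ∧ path ≠ [] then acc ++ [path] else acc

-- the `for i in range(len(coins)): dfs(coins[i + 1:], path + [coins[i]])` loop; each
-- `dfs(suffix, path')` call is `loopA suffix path' (pushA path' ·)` (dfs's first line inlined)
def loopA : List Int → List Int → List (List Int) → List (List Int)
  | [], _, acc => acc
  | c :: rest, path, acc => loopA rest path (loopA rest (path ++ [c]) (pushA (path ++ [c]) acc))

def dfsA (coins : List Int) (path : List Int) (acc : List (List Int)) : List (List Int) :=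
  loopA coins path (pushA path acc)

-- the greedy loop `for i in range(len(coin)-1, -1, -1)` reads coin[i] from last to first,
-- i.e. folds over coin.reverse (indices always in range); state = (count, temp)
def gval (coin : List Int) (amount : Int) : Int :=
  let p := coin.reverse.foldl
    (fun (p : Int × Int) ci => (p.1 + PySem.Int.floordiv p.2 ci, PySem.Int.mod p.2 ci))
    (0, amount)
  if p.2 > 0 ∨ p.1 = 0 then 2 ^ 31 - 1 else p.1

def coinChange1 (coins : List Int) (amount : Int) : Int :=
  let cs := PySem.List.sorted coins (fun x => x) false
  let coin_list := dfsA cs [] []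
  let res := coin_list.foldl (fun res coin => min (gval coin amount) res) (2 ^ 31 - 1)
  if res = 2 ^ 31 - 1 then -1 else res

-- ===== PORT B =====
def finB (t c : Int) : Int := if t ≤ 0 ∧ c ≠ 0 then c else 2 ^ 31 - 1

def recB : List Int → Int → Int → Int
  | [], t, c => finB t c
  | h :: rest, t, c =>
      min (recB rest t c) (recB rest (PySem.Int.mod t h) (c + PySem.Int.floordiv t h))

def coinChange1_alt (coins : List Int) (amount : Int) : Int :=
  let cs := PySem.List.sorted coins (fun x => x) false
  let res := recB cs.reverse amount 0
  if res = 2 ^ 31 - 1 then -1 else res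

-- ===== PRECONDITION & SPEC =====
-- Pre_ excludes exactly the inputs containing a zero coin, on which A (and B) raise ZeroDivisionError.
def Pre_coinChange1 (coins : List Int) (amount : Int) : Prop := (0 : Int) ∉ coins
instance (coins : List Int) (amount : Int) : Decidable (Pre_coinChange1 coins amount) := by
  unfold Pre_coinChange1; infer_instance

def pvWitness_coinChange1 : List Int × Int := ([1, 2, 5], 11)

def Spec_coinChange1 (coins : List Int) (amount : Int) (out : Int) : Prop := out = coinChange1_alt coins amount
instance (coins : List Int) (amount : Int) (out : Int) : Decidable (Spec_coinChange1 coins amount out) := by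
  unfold Spec_coinChange1; infer_instance

-- ===== CLAIM (what is proved, stated in full; the proofs are below) =====
def Claim_equal_coinChange1 : Prop := ∀ (coins : List Int) (amount : Int), Dom_coinChange1 coins amount → Pre_coinChange1 coins amount → Spec_coinChange1 coins amount (coinChange1 coins amount)

-- ===== LEMMAS AND PROOFS =====

-- apply a descending coin sequence greedily to state (t, c) = (remaining, count)
def applyF : List Int → Int → Int → Int × Int
  | [], t, c => (t, c)
  | h :: s, t, c => applyF s (PySem.Int.mod t h) (c + PySem.Int.floordiv t h)

def valF (s : List Int) (t c : Int) : Int := finB (applyF s t c).1 (applyF s t c).2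

-- min-fold machinery
def mfold (L : List Int) (r : Int) : Int := L.foldl (fun r x => min x r) r

theorem mfold_min (L : List Int) (a r : Int) : mfold L (min a r) = min a (mfold L r) := by
  induction L generalizing r with
  | nil => rfl
  | cons x L ih =>
      simp only [mfold, List.foldl] at *
      rw [min_left_comm x a r, ih]

theorem mfold_cons (x : Int) (L : List Int) (r : Int) :
    mfold (x :: L) r = min x (mfold L r) := by
  have : mfold (x :: L) r = mfold L (min x r) := rfl
  rw [this, mfold_min]

theorem mfold_le_seed (L : List Int) (r : Int) : mfold L r ≤ r := by
  induction L generalizing r with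
  | nil => exact le_refl r
  | cons x L ih =>
      rw [mfold_cons]
      exact le_trans (min_le_right _ _) (ih r)

theorem mfold_le_mem (L : List Int) (r a : Int) (h : a ∈ L) : mfold L r ≤ a := by
  induction L generalizing r with
  | nil => cases h
  | cons x L ih =>
      rw [mfold_cons]
      rcases List.mem_cons.mp h with h | h
      · exact h ▸ min_le_left _ _
      · exact le_trans (min_le_right _ _) (ih r h)

theorem mfold_mem_or (L : List Int) (r : Int) : mfold L r = r ∨ mfold L r ∈ L := by
  induction L generalizing r with
  | nil => exact Or.inl rfl
  | cons x L ih =>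
      rw [mfold_cons]
      rcases le_total x (mfold L r) with h | h
      · rw [min_eq_left h]; exact Or.inr (List.mem_cons_self ..)
      · rw [min_eq_right h]
        rcases ih r with h' | h'
        · exact Or.inl h'
        · exact Or.inr (List.mem_cons_of_mem _ h')

theorem le_mfold (L : List Int) (r b : Int) (hs : b ≤ r) (hm : ∀ x ∈ L, b ≤ x) :
    b ≤ mfold L r := by
  rcases mfold_mem_or L r with h | h
  · rw [h]; exact hs
  · exact hm _ h

-- recB is a lower bound of valF on every sublist
theorem recB_le (cs : List Int) : ∀ (s : List Int) (t c : Int), s.Sublist cs →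
    recB cs t c ≤ valF s t c := by
  induction cs with
  | nil =>
      intro s t c hs
      rw [List.sublist_nil.mp hs]
      exact le_refl _
  | cons h rest ih =>
      intro s t c hs
      rcases List.sublist_cons_iff.mp hs with hs | ⟨r, rfl, hr⟩
      · exact le_trans (min_le_left _ _) (ih s t c hs)
      · exact le_trans (min_le_right _ _) (ih r _ _ hr)

-- recB attains valF on some sublist
theorem recB_mem (cs : List Int) : ∀ (t c : Int), ∃ s, s.Sublist cs ∧ recB cs t c = valF s t c := by
  induction cs with
  | nil => exact fun t c => ⟨[], List.Sublist.refl _, rfl⟩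
  | cons h rest ih =>
      intro t c
      rcases le_total (recB rest t c) (recB rest (PySem.Int.mod t h) (c + PySem.Int.floordiv t h)) with hle | hle
      · obtain ⟨s, hs, he⟩ := ih t c
        exact ⟨s, List.sublist_cons_of_sublist _ hs, by simpa [recB, min_eq_left hle] using he⟩
      · obtain ⟨s, hs, he⟩ := ih (PySem.Int.mod t h) (c + PySem.Int.floordiv t h)
        exact ⟨h :: s, List.cons_sublist_cons.mpr hs, by simpa [recB, valF, applyF, min_eq_right hle] using he⟩

theorem foldl_applyF (s : List Int) : ∀ (t c : Int),
    s.foldl (fun (p : Int × Int) ci => (p.1 + PySem.Int.floordiv p.2 ci, PySem.Int.mod p.2 ci)) (c, t)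
      = ((applyF s t c).2, (applyF s t c).1) := by
  induction s with
  | nil => intro t c; rfl
  | cons h s ih => intro t c; simp only [List.foldl, applyF]; exact ih _ _

theorem gval_eq (p : List Int) (a : Int) : gval p a = valF p.reverse a 0 := by
  simp only [gval, valF, foldl_applyF]
  rcases applyF p.reverse a 0 with ⟨t', c'⟩
  simp only [finB]
  split_ifs <;> omega

-- membership in A's subset list
theorem mem_pushA (x p : List Int) (acc : List (List Int)) :
    x ∈ pushA p acc ↔ x ∈ acc ∨ (x = p ∧ p ≠ []) := by
  unfold pushA
  split_ifs with h
  · simp only [List.mem_append, List.mem_singleton]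
    constructor
    · rintro (hx | rfl)
      · exact Or.inl hx
      · exact Or.inr ⟨rfl, h.2⟩
    · rintro (hx | ⟨rfl, _⟩)
      · exact Or.inl hx
      · exact Or.inr rfl
  · constructor
    · exact Or.inl
    · rintro (hx | ⟨rfl, hne⟩)
      · exact hx
      · rcases not_and_or.mp h with h' | h'
        · exact not_not.mp h'
        · exact absurd (not_not.mp h') hne

theorem mem_loopA (coins : List Int) : ∀ (path : List Int) (acc : List (List Int)) (x : List Int),
    x ∈ loopA coins path acc ↔ x ∈ acc ∨ ∃ s, s.Sublist coins ∧ s ≠ [] ∧ x = path ++ s := by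
  induction coins with
  | nil =>
      intro path acc x
      simp only [loopA]
      constructor
      · exact Or.inl
      · rintro (hx | ⟨s, hs, hne, _⟩)
        · exact hx
        · exact absurd (List.sublist_nil.mp hs) hne
  | cons c rest ih =>
      intro path acc x
      simp only [loopA]
      rw [ih, ih, mem_pushA]
      constructor
      · rintro (((hx | ⟨rfl, _⟩) | ⟨s, hs, hne, rfl⟩) | ⟨s, hs, hne, rfl⟩)
        · exact Or.inl hx
        · exact Or.inr ⟨[c], (List.cons_sublist_cons.mpr (List.nil_sublist _)), by simp, by simp⟩
        · exact Or.inr ⟨c :: s, List.cons_sublist_cons.mpr hs, by simp, by simp⟩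
        · exact Or.inr ⟨s, List.sublist_cons_of_sublist _ hs, hne, rfl⟩
      · rintro (hx | ⟨s, hs, hne, rfl⟩)
        · exact Or.inl (Or.inl (Or.inl hx))
        · rcases List.sublist_cons_iff.mp hs with hs' | ⟨r, rfl, hr⟩
          · exact Or.inr ⟨s, hs', hne, rfl⟩
          · rcases r with _ | ⟨r0, rtl⟩
            · exact Or.inl (Or.inl (Or.inr ⟨by simp, by simp⟩))
            · exact Or.inl (Or.inr ⟨r0 :: rtl, hr, by simp, by simp⟩)

theorem mem_coin_list (cs x : List Int) :
    x ∈ dfsA cs [] [] ↔ x ≠ [] ∧ x.Sublist cs := by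
  unfold dfsA pushA
  rw [if_neg (by simp), mem_loopA]
  simp only [List.not_mem_nil, false_or, List.nil_append]
  constructor
  · rintro ⟨s, hs, hne, rfl⟩; exact ⟨hne, hs⟩
  · rintro ⟨hne, hs⟩; exact ⟨x, hs, hne, rfl⟩

theorem main_eq (cs : List Int) (amount : Int) :
    (dfsA cs [] []).foldl (fun res coin => min (gval coin amount) res) (2 ^ 31 - 1)
      = recB cs.reverse amount 0 := by
  have hfold : (dfsA cs [] []).foldl (fun res coin => min (gval coin amount) res) (2 ^ 31 - 1)
      = mfold ((dfsA cs [] []).map (fun p => gval p amount)) (2 ^ 31 - 1) := by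
    rw [mfold, List.foldl_map]
  rw [hfold]
  have hINF : finB amount 0 = 2 ^ 31 - 1 := by simp [finB]
  apply le_antisymm
  · -- A's min ≤ recB: recB attains valF on some sublist
    obtain ⟨s, hs, he⟩ := recB_mem cs.reverse amount 0
    rcases eq_or_ne s [] with rfl | hne
    · rw [he]
      simpa [valF, applyF, hINF] using mfold_le_seed _ _
    · have hp : s.reverse ∈ dfsA cs [] [] := by
        rw [mem_coin_list]
        refine ⟨by simpa using hne, ?_⟩
        simpa using hs.reverse
      have : gval s.reverse amount = recB cs.reverse amount 0 := by
        rw [gval_eq, List.reverse_reverse, he]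
      exact this ▸ mfold_le_mem _ _ _ (List.mem_map_of_mem hp)
  · -- recB ≤ A's min: recB is a lower bound of every listed value and of the seed
    apply le_mfold
    · calc recB cs.reverse amount 0 ≤ valF [] amount 0 := recB_le _ [] _ _ (List.nil_sublist _)
        _ = 2 ^ 31 - 1 := by simpa [valF, applyF] using hINF
    · intro v hv
      obtain ⟨p, hp, rfl⟩ := List.mem_map.mp hv
      obtain ⟨-, hsub⟩ := (mem_coin_list cs p).mp hp
      rw [gval_eq]
      exact recB_le _ _ _ _ hsub.reverse

-- ===== VERDICT (by name: the statement is the Claim_ definition above) =====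
theorem coinChange1_spec : Claim_equal_coinChange1 := by
  intro coins amount _ _
  unfold Spec_coinChange1 coinChange1 coinChange1_alt
  simp only [main_eq]
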